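-- pv_equiv track=rewrite | github.com/LukhasAI/Lukhas | scripts/analysis/agi_module_analyzer.py | _suggest_interface_standard
-- ===== SOURCE A (Python) =====
-- def _suggest_interface_standard(common_interfaces: list[str]) -> dict:
--     """Suggest a standard interface for a component type"""
--     # Basic interface standardization suggestions
--     patterns = {
--         "initialization": [iface for iface in common_interfaces if "init" in iface.lower()],
--         "processing": [
--             iface
--             for iface in common_interfaces
--             if any(word in iface.lower() for word in ["process", "execute", "run", "compute"])
--         ],
--         "configuration": [
--             iface
--             for iface in common_interfaces
--             if any(word in iface.lower() for word in ["config", "setup", "configure"])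
--         ],
--         "state_management": [
--             iface
--             for iface in common_interfaces
--             if any(word in iface.lower() for word in ["get_state", "set_state", "update"])
--         ],
--     }
--
--     return {category: interfaces for category, interfaces in patterns.items() if interfaces}
-- ===== SOURCE B (Python) =====
-- _KEYWORD_BITS = [
--     ("init", 1),
--     ("process", 2), ("execute", 2), ("run", 2), ("compute", 2),
--     ("config", 4), ("setup", 4), ("configure", 4),
--     ("get_state", 8), ("set_state", 8), ("update", 8),
-- ]
--
-- _CATEGORY_BITS = [
--     ("initialization", 1),
--     ("processing", 2),
--     ("configuration", 4),
--     ("state_management", 8),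
-- ]
--
--
-- def _suggest_interface_standard(common_interfaces: list[str]) -> dict:
--     """Suggest a standard interface for a component type (keyword-table / bitmask version)."""
--     # Stage 1: tag every interface with a bitmask of matching categories,
--     # driven by one flat keyword table (lower() computed once per name).
--     tagged = []
--     for iface in common_interfaces:
--         low = iface.lower()
--         mask = 0
--         for kw, bit in _KEYWORD_BITS:
--             if kw in low:
--                 mask |= bit
--         tagged.append((iface, mask))
--     # Stage 2: group the tagged names by category bit, keeping non-empty buckets.
--     out = {}
--     for name, bit in _CATEGORY_BITS:
--         bucket = [iface for iface, mask in tagged if mask & bit]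
--         if bucket:
--             out[name] = bucket
--     return out
-- ===== Notes on version B (the rewrite author's own statement) =====
-- stated objective: faster
-- what changed: Replaces A's four per-category list comprehensions with a data-driven two-stage algorithm: a flat keyword->bit table tags each interface once with a category bitmask (one lower() per name instead of four), and the result is then assembled by bit-testing the tagged list per category, dropping empty buckets.
import Mathlib
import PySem

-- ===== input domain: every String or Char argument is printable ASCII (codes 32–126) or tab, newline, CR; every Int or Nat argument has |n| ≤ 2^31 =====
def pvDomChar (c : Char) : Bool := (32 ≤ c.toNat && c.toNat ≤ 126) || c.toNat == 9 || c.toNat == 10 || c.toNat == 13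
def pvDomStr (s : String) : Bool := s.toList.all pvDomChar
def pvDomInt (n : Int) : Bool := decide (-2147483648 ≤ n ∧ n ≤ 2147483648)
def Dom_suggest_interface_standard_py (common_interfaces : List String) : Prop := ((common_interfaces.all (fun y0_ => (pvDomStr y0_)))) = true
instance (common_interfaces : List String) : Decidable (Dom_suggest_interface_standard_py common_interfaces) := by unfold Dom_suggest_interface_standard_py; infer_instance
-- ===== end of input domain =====

-- B replaces A's four per-category comprehension passes with a data-driven two-stage
-- algorithm: a flat keyword->bit table tags each interface once with a category bitmask,
-- then the buckets are assembled by bit tests (objective: alternative).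

-- ===== PORT A =====
def pvIsInit (iface : String) : Bool := PySem.Str.isIn "init" (PySem.Str.lower iface)
def pvIsProc (iface : String) : Bool :=
  ["process", "execute", "run", "compute"].any (fun w => PySem.Str.isIn w (PySem.Str.lower iface))
def pvIsConf (iface : String) : Bool :=
  ["config", "setup", "configure"].any (fun w => PySem.Str.isIn w (PySem.Str.lower iface))
def pvIsState (iface : String) : Bool :=
  ["get_state", "set_state", "update"].any (fun w => PySem.Str.isIn w (PySem.Str.lower iface))

-- four list-comprehension passes, then the dict comprehension dropping empty lists
def suggest_interface_standard_py (common_interfaces : List String) : List (String × List String) :=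
  let patterns : List (String × List String) :=
    [("initialization", common_interfaces.filter pvIsInit),
     ("processing", common_interfaces.filter pvIsProc),
     ("configuration", common_interfaces.filter pvIsConf),
     ("state_management", common_interfaces.filter pvIsState)]
  patterns.filter (fun p => !p.2.isEmpty)

-- ===== PORT B =====
-- flat keyword -> category-bit table (module-level constant in Source B)
def pvKeywordBits : List (String × Nat) :=
  [("init", 1),
   ("process", 2), ("execute", 2), ("run", 2), ("compute", 2),
   ("config", 4), ("setup", 4), ("configure", 4),
   ("get_state", 8), ("set_state", 8), ("update", 8)]

def pvCategoryBits : List (String × Nat) :=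
  [("initialization", 1), ("processing", 2), ("configuration", 4), ("state_management", 8)]

-- stage 1 inner loop: OR together the bits of the keywords found in `low`
def pvMaskOf (low : String) : Nat :=
  pvKeywordBits.foldl (fun m p => if PySem.Str.isIn p.1 low then m ||| p.2 else m) 0

-- stage 1 pass: tag each interface with its bitmask, then stage 2: group by category bit
def suggest_interface_standard_py_alt (common_interfaces : List String) : List (String × List String) :=
  let tagged : List (String × Nat) :=
    common_interfaces.foldl (fun t iface => t ++ [(iface, pvMaskOf (PySem.Str.lower iface))]) []
  pvCategoryBits.foldl
    (fun out p =>
      let bucket := (tagged.filter (fun q => q.2 &&& p.2 != 0)).map Prod.fst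
      if bucket.isEmpty then out else out ++ [(p.1, bucket)])
    []

-- ===== PRECONDITION & SPEC =====
def Spec_suggest_interface_standard_py (common_interfaces : List String) (out : List (String × List String)) : Prop := out = suggest_interface_standard_py_alt common_interfaces
instance (common_interfaces : List String) (out : List (String × List String)) : Decidable (Spec_suggest_interface_standard_py common_interfaces out) := by unfold Spec_suggest_interface_standard_py; infer_instance

-- ===== CLAIM (what is proved, stated in full; the proofs are below) =====
def Claim_equal_suggest_interface_standard_py : Prop := ∀ (common_interfaces : List String), Dom_suggest_interface_standard_py common_interfaces → Spec_suggest_interface_standard_py common_interfaces (suggest_interface_standard_py common_interfaces)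

-- ===== LEMMAS AND PROOFS =====

-- bit k of a keyword-table fold: set iff already set or some matching keyword carries it
theorem pv_testBit_foldl (low : String) (t : List (String × Nat)) (m : Nat) (k : Nat) :
    ((t.foldl (fun m p => if PySem.Str.isIn p.1 low then m ||| p.2 else m) m).testBit k)
    = (m.testBit k || t.any (fun p => PySem.Str.isIn p.1 low && p.2.testBit k)) := by
  induction t generalizing m with
  | nil => simp
  | cons p t ih =>
    simp only [List.foldl_cons, List.any_cons]
    rw [ih]
    by_cases h : PySem.Str.isIn p.1 low
    · rw [if_pos h, h]
      simp [Nat.testBit_or, Bool.or_assoc]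
    · rw [if_neg h]
      simp only [Bool.not_eq_true] at h
      rw [h]
      simp

-- a bit test against a power of two is a testBit
theorem pv_and_pow_ne (n k : Nat) : ((n &&& 2 ^ k) != 0) = n.testBit k := by
  rw [Nat.and_two_pow]
  cases h : n.testBit k <;> simp

-- the four bit tests of pvMaskOf are exactly A's four category predicates
theorem pv_mask_init (s : String) :
    ((pvMaskOf (PySem.Str.lower s) &&& 1) != 0) = pvIsInit s := by
  rw [show (1 : Nat) = 2 ^ 0 from rfl, pv_and_pow_ne]
  unfold pvMaskOf
  rw [pv_testBit_foldl]
  simp [pvKeywordBits, pvIsInit]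

theorem pv_mask_proc (s : String) :
    ((pvMaskOf (PySem.Str.lower s) &&& 2) != 0) = pvIsProc s := by
  rw [show (2 : Nat) = 2 ^ 1 from rfl, pv_and_pow_ne]
  unfold pvMaskOf
  rw [pv_testBit_foldl]
  simp [pvKeywordBits, pvIsProc,
    show Nat.testBit 1 1 = false by decide,
    show Nat.testBit 2 1 = true by decide,
    show Nat.testBit 4 1 = false by decide,
    show Nat.testBit 8 1 = false by decide]

theorem pv_mask_conf (s : String) :
    ((pvMaskOf (PySem.Str.lower s) &&& 4) != 0) = pvIsConf s := by
  rw [show (4 : Nat) = 2 ^ 2 from rfl, pv_and_pow_ne]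
  unfold pvMaskOf
  rw [pv_testBit_foldl]
  simp [pvKeywordBits, pvIsConf,
    show Nat.testBit 1 2 = false by decide,
    show Nat.testBit 2 2 = false by decide,
    show Nat.testBit 4 2 = true by decide,
    show Nat.testBit 8 2 = false by decide]

theorem pv_mask_state (s : String) :
    ((pvMaskOf (PySem.Str.lower s) &&& 8) != 0) = pvIsState s := by
  rw [show (8 : Nat) = 2 ^ 3 from rfl, pv_and_pow_ne]
  unfold pvMaskOf
  rw [pv_testBit_foldl]
  simp [pvKeywordBits, pvIsState,
    show Nat.testBit 1 3 = false by decide,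
    show Nat.testBit 2 3 = false by decide,
    show Nat.testBit 4 3 = false by decide,
    show Nat.testBit 8 3 = true by decide]

-- the stage-1 fold is a map
theorem pv_tagged_eq_map (xs : List String) (acc : List (String × Nat)) :
    xs.foldl (fun t iface => t ++ [(iface, pvMaskOf (PySem.Str.lower iface))]) acc
    = acc ++ xs.map (fun iface => (iface, pvMaskOf (PySem.Str.lower iface))) := by
  induction xs generalizing acc with
  | nil => simp
  | cons x xs ih => simp [ih]

-- bucket of a bit over the tagged list = filter of the matching predicate
theorem pv_bucket_eq_filter (xs : List String) (bit : Nat) (pred : String → Bool)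
    (hp : ∀ s, ((pvMaskOf (PySem.Str.lower s) &&& bit) != 0) = pred s) :
    (((xs.map (fun iface => (iface, pvMaskOf (PySem.Str.lower iface)))).filter
        (fun q => q.2 &&& bit != 0)).map Prod.fst)
    = xs.filter pred := by
  rw [List.filter_map, List.map_map]
  simp only [Function.comp_def]
  rw [List.filter_congr (fun s _ => hp s)]
  simp

theorem suggest_interface_standard_py_spec : Claim_equal_suggest_interface_standard_py := by
  intro xs _
  unfold Spec_suggest_interface_standard_py suggest_interface_standard_py
    suggest_interface_standard_py_alt
  rw [pv_tagged_eq_map xs []]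
  simp only [List.nil_append, pvCategoryBits, List.foldl_cons, List.foldl_nil,
    pv_bucket_eq_filter xs 1 pvIsInit pv_mask_init,
    pv_bucket_eq_filter xs 2 pvIsProc pv_mask_proc,
    pv_bucket_eq_filter xs 4 pvIsConf pv_mask_conf,
    pv_bucket_eq_filter xs 8 pvIsState pv_mask_state]
  cases h1 : (xs.filter pvIsInit).isEmpty <;>
    cases h2 : (xs.filter pvIsProc).isEmpty <;>
      cases h3 : (xs.filter pvIsConf).isEmpty <;>
        cases h4 : (xs.filter pvIsState).isEmpty <;>
          simp [List.filter, h1, h2, h3, h4]
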